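-- pv_equiv track=rewrite | github.com/Nashirudin-Baqiy/praktikum | new/Metnum/Tugas3/py/regresi.py | regresi
-- ===== SOURCE A (Python) =====
-- def x2(x):
--     return x*x
--
-- def x3(x):
--     return x*x*x
--
-- def x4(x):
--     return x*x*x*x
--
-- def regresi(x, y):
--     #Panjang/jumlah data point
--     n = len(x)
--     #Inisiasi tabel
--     tbl = [[None for x in range(7)] for x in range(n+1)]
--     #Sum x
--     sx = 0
--     for i in range(n):
--         sx = sx + x[i]
--         tbl[i][0] = x[i]
--     tbl[n][0] = sx
--     #Sum y
--     sy = 0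
--     for i in range(n):
--         sy = sy + y[i]
--         tbl[i][1] = y[i]
--     tbl[n][1] = sy
--     #Sum x2
--     sx2 = 0
--     for i in range(n):
--         sx2 = sx2 + x2(x[i])
--         tbl[i][2] = x2(x[i])
--     tbl[n][2] = sx2
--     #Sum x3
--     sx3 = 0
--     for i in range(n):
--         sx3 = sx3 + x3(x[i])
--         tbl[i][3] = x3(x[i])
--     tbl[n][3] = sx3
--     #Sum x4
--     sx4 = 0
--     for i in range(n):
--         sx4 = sx4 + x4(x[i])
--         tbl[i][4] = x4(x[i])
--     tbl[n][4] = sx4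
--     #Sum x.y
--     sxy = 0
--     for i in range(n):
--         sxy = sxy + x[i]*y[i]
--         tbl[i][5] = x[i]*y[i]
--     tbl[n][5] = sxy
--     #Sum x2y
--     sx2y = 0
--     for i in range(n):
--         sx2y = sx2y + x2(x[i])*y[i]
--         tbl[i][6] = x2(x[i])*y[i]
--     tbl[n][6] = sx2y
--
--     return tbl
-- ===== SOURCE B (Python) =====
-- def regresi(x, y):
--     rows = [[xi, yi, xi * xi, xi * xi * xi, xi * xi * xi * xi, xi * yi, xi * xi * yi]
--             for xi, yi in zip(x, y)]
--     totals = [sum(r[j] for r in rows) for j in range(7)]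
--     return rows + [totals]
-- ===== Notes on version B (the rewrite author's own statement) =====
-- stated objective: idiomatic
-- what changed: Replaces the preallocated (n+1)x7 table mutated by seven separate index loops with a single zip comprehension building each row at once plus a column-sum totals row appended at the end.
import Mathlib
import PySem

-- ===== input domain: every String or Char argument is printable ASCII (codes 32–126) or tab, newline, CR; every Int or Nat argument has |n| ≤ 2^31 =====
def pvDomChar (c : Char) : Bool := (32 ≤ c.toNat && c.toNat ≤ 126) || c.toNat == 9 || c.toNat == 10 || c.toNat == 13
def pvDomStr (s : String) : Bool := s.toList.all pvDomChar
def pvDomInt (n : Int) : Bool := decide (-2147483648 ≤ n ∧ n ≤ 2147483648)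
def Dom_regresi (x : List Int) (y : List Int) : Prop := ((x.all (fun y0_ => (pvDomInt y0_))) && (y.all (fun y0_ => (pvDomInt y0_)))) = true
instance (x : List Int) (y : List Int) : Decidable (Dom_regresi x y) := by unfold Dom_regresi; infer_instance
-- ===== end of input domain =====

-- B builds each 7-entry row in one zip comprehension and appends a column-sum totals row,
-- replacing A's preallocated table mutated by seven separate index loops (objective: idiomatic).

-- ===== PORT A =====
-- helper x2 of the Python module
def x2 (x : Int) : Int := x * x
-- helper x3 of the Python module
def x3 (x : Int) : Int := x * x * x
-- helper x4 of the Python module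
def x4 (x : Int) : Int := x * x * x * x

-- tbl[i][j] = v  (in-range assignment; Python indices here are always in range)
def setCell (t : List (List Int)) (i j : Nat) (v : Int) : List (List Int) :=
  t.set i ((t.getD i []).set j v)

-- literal port of A: the [[None]*7]*(n+1) table is ported with dummy 0 cells (under Pre_
-- every cell is overwritten before return); x[i]/y[i] with i < length is List.getD, exact there
def regresi (x : List Int) (y : List Int) : List (List Int) :=
  let n := x.length
  let tbl := List.replicate (n+1) (List.replicate 7 (0:Int))
  -- Sum x
  let p := (List.range n).foldl (fun (p : Int × List (List Int)) i =>
      (p.1 + x.getD i 0, setCell p.2 i 0 (x.getD i 0))) ((0:Int), tbl)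
  let tbl := setCell p.2 n 0 p.1
  -- Sum y  (y[i] raises IndexError when y is shorter than x: those inputs are outside Pre_)
  let p := (List.range n).foldl (fun (p : Int × List (List Int)) i =>
      (p.1 + y.getD i 0, setCell p.2 i 1 (y.getD i 0))) ((0:Int), tbl)
  let tbl := setCell p.2 n 1 p.1
  -- Sum x2
  let p := (List.range n).foldl (fun (p : Int × List (List Int)) i =>
      (p.1 + x2 (x.getD i 0), setCell p.2 i 2 (x2 (x.getD i 0)))) ((0:Int), tbl)
  let tbl := setCell p.2 n 2 p.1
  -- Sum x3
  let p := (List.range n).foldl (fun (p : Int × List (List Int)) i =>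
      (p.1 + x3 (x.getD i 0), setCell p.2 i 3 (x3 (x.getD i 0)))) ((0:Int), tbl)
  let tbl := setCell p.2 n 3 p.1
  -- Sum x4
  let p := (List.range n).foldl (fun (p : Int × List (List Int)) i =>
      (p.1 + x4 (x.getD i 0), setCell p.2 i 4 (x4 (x.getD i 0)))) ((0:Int), tbl)
  let tbl := setCell p.2 n 4 p.1
  -- Sum x.y
  let p := (List.range n).foldl (fun (p : Int × List (List Int)) i =>
      (p.1 + x.getD i 0 * y.getD i 0, setCell p.2 i 5 (x.getD i 0 * y.getD i 0))) ((0:Int), tbl)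
  let tbl := setCell p.2 n 5 p.1
  -- Sum x2y
  let p := (List.range n).foldl (fun (p : Int × List (List Int)) i =>
      (p.1 + x2 (x.getD i 0) * y.getD i 0, setCell p.2 i 6 (x2 (x.getD i 0) * y.getD i 0))) ((0:Int), tbl)
  let tbl := setCell p.2 n 6 p.1
  tbl

-- ===== PORT B =====
def regresi_alt (x : List Int) (y : List Int) : List (List Int) :=
  let rows := (x.zip y).map (fun p =>
    [p.1, p.2, p.1 * p.1, p.1 * p.1 * p.1, p.1 * p.1 * p.1 * p.1, p.1 * p.2, p.1 * p.1 * p.2])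
  let totals := (List.range 7).map (fun j => (rows.map (fun r => r.getD j 0)).sum)
  rows ++ [totals]

-- ===== PRECONDITION & SPEC =====
-- A raises IndexError when y is shorter than x (the y-loop reads y[i] for every i < len(x))
def Pre_regresi (x : List Int) (y : List Int) : Prop := x.length ≤ y.length
instance (x : List Int) (y : List Int) : Decidable (Pre_regresi x y) := by unfold Pre_regresi; infer_instance
def pvWitness_regresi : List Int × List Int := ([1, 2], [3, 4])

def Spec_regresi (x : List Int) (y : List Int) (out : List (List Int)) : Prop := out = regresi_alt x y
instance (x : List Int) (y : List Int) (out : List (List Int)) : Decidable (Spec_regresi x y out) := by unfold Spec_regresi; infer_instance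

-- ===== CLAIM (what is proved, stated in full; the proofs are below) =====
def Claim_equal_regresi : Prop := ∀ (x : List Int) (y : List Int), Dom_regresi x y → Pre_regresi x y → Spec_regresi x y (regresi x y)

-- ===== LEMMAS AND PROOFS =====

theorem length_setCell (t : List (List Int)) (i j : Nat) (v : Int) :
    (setCell t i j v).length = t.length := by
  simp [setCell]

theorem getD_setCell_self (t : List (List Int)) (i j : Nat) (v : Int) (h : i < t.length) :
    (setCell t i j v).getD i [] = (t.getD i []).set j v := by
  simp [setCell, List.getD, List.getElem?_set_self', List.getElem?_eq_getElem h]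

theorem getD_setCell_ne (t : List (List Int)) (i i' j : Nat) (v : Int) (h : i ≠ i') :
    (setCell t i' j v).getD i [] = t.getD i [] := by
  simp [setCell, List.getD, List.getElem?_set_ne (Ne.symm h)]

-- one column pass of A, abstracted over the value function v and the column j
theorem foldl_pass (v : Nat → Int) (j : Nat) (n : Nat) (tbl : List (List Int)) (s : Int) :
    ((List.range n).foldl (fun (p : Int × List (List Int)) i =>
        (p.1 + v i, setCell p.2 i j (v i))) (s, tbl)).1
      = s + ((List.range n).map v).sum ∧
    ((List.range n).foldl (fun (p : Int × List (List Int)) i =>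
        (p.1 + v i, setCell p.2 i j (v i))) (s, tbl)).2.length = tbl.length ∧
    ∀ i, i < tbl.length →
      ((List.range n).foldl (fun (p : Int × List (List Int)) i =>
        (p.1 + v i, setCell p.2 i j (v i))) (s, tbl)).2.getD i []
      = if i < n then (tbl.getD i []).set j (v i) else tbl.getD i [] := by
  induction n with
  | zero => simp
  | succ m ih =>
    obtain ⟨h1, h2, h3⟩ := ih
    rw [List.range_succ]
    refine ⟨?_, ?_, ?_⟩
    · simp [List.foldl_append, h1, add_assoc]
    · simp [List.foldl_append, length_setCell, h2]
    · intro i hi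
      simp only [List.foldl_append, List.foldl_cons, List.foldl_nil]
      by_cases hin : i = m
      · subst hin
        rw [getD_setCell_self _ _ _ _ (by rw [h2]; exact hi), h3 i hi]
        simp
      · rw [getD_setCell_ne _ _ _ _ _ hin, h3 i hi]
        have : (i < m + 1) ↔ (i < m) := by omega
        simp [this]

def passT (v : Nat → Int) (j n : Nat) (tbl : List (List Int)) : List (List Int) :=
  setCell ((List.range n).foldl (fun (p : Int × List (List Int)) i =>
      (p.1 + v i, setCell p.2 i j (v i))) ((0:Int), tbl)).2 n j
    ((List.range n).foldl (fun (p : Int × List (List Int)) i =>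
      (p.1 + v i, setCell p.2 i j (v i))) ((0:Int), tbl)).1

theorem passT_spec (v : Nat → Int) (j : Nat) (n : Nat) (tbl : List (List Int))
    (hlen : tbl.length = n + 1) :
    (passT v j n tbl).length = n + 1 ∧
    ∀ i, i < n + 1 →
      (passT v j n tbl).getD i []
      = if i < n then (tbl.getD i []).set j (v i)
        else (tbl.getD n []).set j (((List.range n).map v).sum) := by
  obtain ⟨h1, h2, h3⟩ := foldl_pass v j n tbl 0
  unfold passT
  constructor
  · rw [length_setCell, h2, hlen]
  · intro i hi
    by_cases hin : i = n
    · subst hin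
      rw [getD_setCell_self _ _ _ _ (by rw [h2, hlen]; omega), h3 i (by omega), h1]
      simp
    · have hi' : i < n := by omega
      rw [getD_setCell_ne _ _ _ _ _ hin, h3 i (by omega)]
      simp [hi']

-- A's body is exactly seven passT stages
theorem regresi_eq (x y : List Int) :
    regresi x y =
      passT (fun i => x2 (x.getD i 0) * y.getD i 0) 6 x.length
       (passT (fun i => x.getD i 0 * y.getD i 0) 5 x.length
        (passT (fun i => x4 (x.getD i 0)) 4 x.length
         (passT (fun i => x3 (x.getD i 0)) 3 x.length
          (passT (fun i => x2 (x.getD i 0)) 2 x.length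
           (passT (fun i => y.getD i 0) 1 x.length
            (passT (fun i => x.getD i 0) 0 x.length
             (List.replicate (x.length+1) (List.replicate 7 (0:Int))))))))) := rfl

-- both programs' row contents as lists of getD-values
theorem zip_map_eq_range_map (x y : List Int) (h : x.length ≤ y.length) (g : Int → Int → Int) :
    (x.zip y).map (fun p => g p.1 p.2)
      = (List.range x.length).map (fun i => g (x.getD i 0) (y.getD i 0)) := by
  apply List.ext_getElem (by simp; omega)
  intro i h1 h2
  have hx : i < x.length := by simpa using h2
  have hy : i < y.length := lt_of_lt_of_le hx h
  simp only [List.getElem_map, List.getElem_zip, List.getElem_range,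
    List.getD_eq_getElem _ _ hx, List.getD_eq_getElem _ _ hy]

-- pointwise description of A's result
theorem regresi_getD (x y : List Int) :
    (regresi x y).length = x.length + 1 ∧
    ∀ i, i < x.length + 1 →
      (regresi x y).getD i []
      = if i < x.length then
          [x.getD i 0, y.getD i 0, x2 (x.getD i 0), x3 (x.getD i 0), x4 (x.getD i 0),
           x.getD i 0 * y.getD i 0, x2 (x.getD i 0) * y.getD i 0]
        else
          [((List.range x.length).map (fun i => x.getD i 0)).sum,
           ((List.range x.length).map (fun i => y.getD i 0)).sum,
           ((List.range x.length).map (fun i => x2 (x.getD i 0))).sum,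
           ((List.range x.length).map (fun i => x3 (x.getD i 0))).sum,
           ((List.range x.length).map (fun i => x4 (x.getD i 0))).sum,
           ((List.range x.length).map (fun i => x.getD i 0 * y.getD i 0)).sum,
           ((List.range x.length).map (fun i => x2 (x.getD i 0) * y.getD i 0)).sum] := by
  obtain ⟨l1, g1⟩ := passT_spec (fun i => x.getD i 0) 0 x.length
    (List.replicate (x.length+1) (List.replicate 7 (0:Int))) (by simp)
  obtain ⟨l2, g2⟩ := passT_spec (fun i => y.getD i 0) 1 x.length _ l1
  obtain ⟨l3, g3⟩ := passT_spec (fun i => x2 (x.getD i 0)) 2 x.length _ l2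
  obtain ⟨l4, g4⟩ := passT_spec (fun i => x3 (x.getD i 0)) 3 x.length _ l3
  obtain ⟨l5, g5⟩ := passT_spec (fun i => x4 (x.getD i 0)) 4 x.length _ l4
  obtain ⟨l6, g6⟩ := passT_spec (fun i => x.getD i 0 * y.getD i 0) 5 x.length _ l5
  obtain ⟨l7, g7⟩ := passT_spec (fun i => x2 (x.getD i 0) * y.getD i 0) 6 x.length _ l6
  rw [regresi_eq]
  refine ⟨l7, ?_⟩
  intro i hi
  have hn : x.length < x.length + 1 := by omega
  by_cases hlt : i < x.length
  · rw [if_pos hlt, g7 i hi, if_pos hlt, g6 i hi, if_pos hlt, g5 i hi, if_pos hlt,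
      g4 i hi, if_pos hlt, g3 i hi, if_pos hlt, g2 i hi, if_pos hlt, g1 i hi, if_pos hlt,
      List.getD_replicate _ (by omega)]
    rfl
  · rw [if_neg hlt, g7 i hi, if_neg hlt, g6 _ hn, if_neg (by omega), g5 _ hn,
      if_neg (by omega), g4 _ hn, if_neg (by omega), g3 _ hn, if_neg (by omega),
      g2 _ hn, if_neg (by omega), g1 _ hn, if_neg (by omega), List.getD_replicate _ (by omega)]
    rfl

-- pointwise description of B's result
theorem regresi_alt_getD (x y : List Int) (h : x.length ≤ y.length) :
    (regresi_alt x y).length = x.length + 1 ∧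
    ∀ i, i < x.length + 1 →
      (regresi_alt x y).getD i []
      = if i < x.length then
          [x.getD i 0, y.getD i 0, x2 (x.getD i 0), x3 (x.getD i 0), x4 (x.getD i 0),
           x.getD i 0 * y.getD i 0, x2 (x.getD i 0) * y.getD i 0]
        else
          [((List.range x.length).map (fun i => x.getD i 0)).sum,
           ((List.range x.length).map (fun i => y.getD i 0)).sum,
           ((List.range x.length).map (fun i => x2 (x.getD i 0))).sum,
           ((List.range x.length).map (fun i => x3 (x.getD i 0))).sum,
           ((List.range x.length).map (fun i => x4 (x.getD i 0))).sum,
           ((List.range x.length).map (fun i => x.getD i 0 * y.getD i 0)).sum,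
           ((List.range x.length).map (fun i => x2 (x.getD i 0) * y.getD i 0)).sum] := by
  unfold regresi_alt
  have hrows : ((x.zip y).map (fun p =>
      [p.1, p.2, p.1 * p.1, p.1 * p.1 * p.1, p.1 * p.1 * p.1 * p.1, p.1 * p.2, p.1 * p.1 * p.2])).length
      = x.length := by simp; omega
  refine ⟨by simp [hrows], ?_⟩
  intro i hi
  by_cases hlt : i < x.length
  · rw [List.getD_eq_getElem _ _ (by simp [hrows]; omega),
      List.getElem_append_left (by rw [hrows]; omega), if_pos hlt]
    have hy : i < y.length := lt_of_lt_of_le hlt h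
    rw [List.getD_eq_getElem x 0 hlt, List.getD_eq_getElem y 0 hy,
      List.getElem_map, List.getElem_zip, x2, x3, x4]
  · have hie : i = x.length := by omega
    subst hie
    rw [List.getD_eq_getElem _ _ (by simp [hrows]),
      List.getElem_append_right (by rw [hrows]), if_neg hlt]
    simp only [hrows, Nat.sub_self, List.getElem_cons_zero]
    have m0 : ((x.zip y).map (fun p =>
        [p.1, p.2, p.1 * p.1, p.1 * p.1 * p.1, p.1 * p.1 * p.1 * p.1, p.1 * p.2, p.1 * p.1 * p.2])).map
        (fun r => r.getD 0 0) = (x.zip y).map (fun p => p.1) := by rw [List.map_map]; rfl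
    have m1 : ((x.zip y).map (fun p =>
        [p.1, p.2, p.1 * p.1, p.1 * p.1 * p.1, p.1 * p.1 * p.1 * p.1, p.1 * p.2, p.1 * p.1 * p.2])).map
        (fun r => r.getD 1 0) = (x.zip y).map (fun p => p.2) := by rw [List.map_map]; rfl
    have m2 : ((x.zip y).map (fun p =>
        [p.1, p.2, p.1 * p.1, p.1 * p.1 * p.1, p.1 * p.1 * p.1 * p.1, p.1 * p.2, p.1 * p.1 * p.2])).map
        (fun r => r.getD 2 0) = (x.zip y).map (fun p => p.1 * p.1) := by rw [List.map_map]; rfl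
    have m3 : ((x.zip y).map (fun p =>
        [p.1, p.2, p.1 * p.1, p.1 * p.1 * p.1, p.1 * p.1 * p.1 * p.1, p.1 * p.2, p.1 * p.1 * p.2])).map
        (fun r => r.getD 3 0) = (x.zip y).map (fun p => p.1 * p.1 * p.1) := by rw [List.map_map]; rfl
    have m4 : ((x.zip y).map (fun p =>
        [p.1, p.2, p.1 * p.1, p.1 * p.1 * p.1, p.1 * p.1 * p.1 * p.1, p.1 * p.2, p.1 * p.1 * p.2])).map
        (fun r => r.getD 4 0) = (x.zip y).map (fun p => p.1 * p.1 * p.1 * p.1) := by rw [List.map_map]; rfl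
    have m5 : ((x.zip y).map (fun p =>
        [p.1, p.2, p.1 * p.1, p.1 * p.1 * p.1, p.1 * p.1 * p.1 * p.1, p.1 * p.2, p.1 * p.1 * p.2])).map
        (fun r => r.getD 5 0) = (x.zip y).map (fun p => p.1 * p.2) := by rw [List.map_map]; rfl
    have m6 : ((x.zip y).map (fun p =>
        [p.1, p.2, p.1 * p.1, p.1 * p.1 * p.1, p.1 * p.1 * p.1 * p.1, p.1 * p.2, p.1 * p.1 * p.2])).map
        (fun r => r.getD 6 0) = (x.zip y).map (fun p => p.1 * p.1 * p.2) := by rw [List.map_map]; rfl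
    have e0 : (x.zip y).map (fun p => p.1) = (List.range x.length).map (fun i => x.getD i 0) :=
      zip_map_eq_range_map x y h (fun a _ => a)
    have e1 : (x.zip y).map (fun p => p.2) = (List.range x.length).map (fun i => y.getD i 0) :=
      zip_map_eq_range_map x y h (fun _ b => b)
    have e2 : (x.zip y).map (fun p => p.1 * p.1) = (List.range x.length).map (fun i => x2 (x.getD i 0)) :=
      zip_map_eq_range_map x y h (fun a _ => a * a)
    have e3 : (x.zip y).map (fun p => p.1 * p.1 * p.1) = (List.range x.length).map (fun i => x3 (x.getD i 0)) :=
      zip_map_eq_range_map x y h (fun a _ => a * a * a)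
    have e4 : (x.zip y).map (fun p => p.1 * p.1 * p.1 * p.1) = (List.range x.length).map (fun i => x4 (x.getD i 0)) :=
      zip_map_eq_range_map x y h (fun a _ => a * a * a * a)
    have e5 : (x.zip y).map (fun p => p.1 * p.2) = (List.range x.length).map (fun i => x.getD i 0 * y.getD i 0) :=
      zip_map_eq_range_map x y h (fun a b => a * b)
    have e6 : (x.zip y).map (fun p => p.1 * p.1 * p.2) = (List.range x.length).map (fun i => x2 (x.getD i 0) * y.getD i 0) :=
      zip_map_eq_range_map x y h (fun a b => a * a * b)
    rw [show (List.range 7) = [0, 1, 2, 3, 4, 5, 6] from rfl]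
    simp only [List.map_cons, List.map_nil]
    rw [m0, m1, m2, m3, m4, m5, m6, e0, e1, e2, e3, e4, e5, e6]

-- ===== VERDICT (by name: the statement is the Claim_ definition above) =====
theorem regresi_spec : Claim_equal_regresi := by
  intro x y _ hpre
  unfold Spec_regresi
  obtain ⟨hla, hga⟩ := regresi_getD x y
  obtain ⟨hlb, hgb⟩ := regresi_alt_getD x y hpre
  apply List.ext_getElem (by rw [hla, hlb])
  intro i h1 h2
  have hi : i < x.length + 1 := by omega
  rw [← List.getD_eq_getElem (regresi x y) [] h1, ← List.getD_eq_getElem (regresi_alt x y) [] h2,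
    hga i hi, hgb i hi]
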